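-- pv_equiv track=rewrite | github.com/twezo1337/optimal-processing-sequence | method_functions.py | full_time
-- ===== SOURCE A (Python) =====
-- import copy
--
-- def full_time(matr, r):
--     mcopy = copy.deepcopy(matr)
--     cop = copy.deepcopy(matr)
--
--     for n in range(len(r)):
--         for i in range(len(mcopy)):
--             for j in range(len(mcopy[0])):
--                 if r[n] - 1 == j:
--                     mcopy[i][n] = cop[i][j]
--
--     for i in range(1):
--         for j in range(1, len(mcopy[i])):
--             mcopy[i][j] = mcopy[i][j] + mcopy[i][j - 1]
--
--     for i in range(1):
--         for j in range(1, len(mcopy)):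
--             mcopy[j][i] = mcopy[j][i] + mcopy[j - 1][i]
--
--     for i in range(1, len(mcopy[i])):
--         for j in range(1, len(mcopy)):
--             mcopy[j][i] = mcopy[j][i] + max(mcopy[j - 1][i], mcopy[j][i - 1])
--
--     return mcopy[len(mcopy) - 1][len(mcopy[0]) - 1]
-- ===== SOURCE B (Python) =====
-- def full_time(matr, r):
--     rows, cols = len(matr), len(matr[0])
--
--     def cost(i, j):
--         k = r[j] - 1 if j < len(r) else -1
--         return matr[i][k] if 0 <= k < cols else matr[i][j]
--
--     diag = {}
--     for d in range(rows + cols - 1):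
--         nd = {}
--         lo = d - cols + 1 if d - cols + 1 > 0 else 0
--         hi = d if d < rows - 1 else rows - 1
--         for i in range(lo, hi + 1):
--             j = d - i
--             if i == 0 and j == 0:
--                 nd[i] = cost(0, 0)
--             elif i == 0:
--                 nd[i] = diag[0] + cost(0, j)
--             elif j == 0:
--                 nd[i] = diag[i - 1] + cost(i, 0)
--             else:
--                 nd[i] = cost(i, j) + max(diag[i - 1], diag[i])
--         diag = nd
--     return diag[rows - 1]
-- ===== Notes on version B (the rewrite author's own statement) =====
-- stated objective: faster
-- what changed: B sweeps the grid by anti-diagonals, carrying a single wavefront dictionary keyed by row index and computing each permuted cost lazily by direct index arithmetic, instead of A's materialized permuted matrix (filled by a triple-nested column scan) followed by three staged in-place row/column passes over the whole matrix.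
import Mathlib
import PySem

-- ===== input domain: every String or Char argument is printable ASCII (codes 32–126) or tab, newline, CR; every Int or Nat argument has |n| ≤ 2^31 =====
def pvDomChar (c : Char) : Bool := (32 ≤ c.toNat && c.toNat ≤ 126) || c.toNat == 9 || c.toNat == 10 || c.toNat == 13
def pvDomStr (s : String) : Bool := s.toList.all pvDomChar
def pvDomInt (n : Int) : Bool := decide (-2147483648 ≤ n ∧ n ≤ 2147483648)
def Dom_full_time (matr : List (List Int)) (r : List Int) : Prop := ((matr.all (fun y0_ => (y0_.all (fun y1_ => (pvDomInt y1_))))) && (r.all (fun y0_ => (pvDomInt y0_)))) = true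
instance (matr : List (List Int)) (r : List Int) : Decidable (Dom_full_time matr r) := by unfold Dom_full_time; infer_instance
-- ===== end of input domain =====

-- B replaces A's triple-nested column-matching scan and three staged in-place passes by an
-- anti-diagonal wavefront sweep over a dictionary with lazily computed permuted costs
-- (return-value equivalence; A mutates nothing observable, it deep-copies its input).

-- ===== PORT A =====
-- matrix accessors: Python's mcopy[i][j] read / write; Python raises IndexError out of
-- range — Pre_full_time excludes exactly those inputs, so the getD/set defaults are unreachable.
def pvGet (m : List (List Int)) (i j : Nat) : Int := (m.getD i []).getD j 0
def pvSet (m : List (List Int)) (i j : Nat) (v : Int) : List (List Int) :=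
  m.set i ((m.getD i []).set j v)

-- the body of A's first (permutation) loop for one value of n
def ftPermStep (matr : List (List Int)) (r : List Int) (m : List (List Int)) (n : Nat) :
    List (List Int) :=
  (List.range m.length).foldl (fun m i =>
    (List.range (m.getD 0 []).length).foldl (fun m (j : Nat) =>
      if r.getD n 0 - 1 = (j : Int) then pvSet m i n (pvGet matr i j) else m) m) m

def ftPerm (matr : List (List Int)) (r : List Int) : List (List Int) :=
  (List.range r.length).foldl (ftPermStep matr r) matr

def ftRow0 (m : List (List Int)) : List (List Int) :=
  (List.range' 1 ((m.getD 0 []).length - 1)).foldl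
    (fun m j => pvSet m 0 j (pvGet m 0 j + pvGet m 0 (j - 1))) m

def ftCol0 (m : List (List Int)) : List (List Int) :=
  (List.range' 1 (m.length - 1)).foldl
    (fun m j => pvSet m j 0 (pvGet m j 0 + pvGet m (j - 1) 0)) m

def ftDPCol (m : List (List Int)) (i : Nat) : List (List Int) :=
  (List.range' 1 (m.length - 1)).foldl
    (fun m j => pvSet m j i (pvGet m j i + max (pvGet m (j - 1) i) (pvGet m j (i - 1)))) m

def ftDP (m : List (List Int)) : List (List Int) :=
  (List.range' 1 ((m.getD 0 []).length - 1)).foldl ftDPCol m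

def full_time (matr : List (List Int)) (r : List Int) : Int :=
  let m := ftDP (ftCol0 (ftRow0 (ftPerm matr r)))
  pvGet m (m.length - 1) ((m.getD 0 []).length - 1)

-- ===== PORT B =====
-- Source B's cost(i, j): the permuted cell, computed lazily by direct index arithmetic
def costB (matr : List (List Int)) (r : List Int) (cols : Nat) (i j : Nat) : Int :=
  let k : Int := if j < r.length then r.getD j 0 - 1 else -1
  if 0 ≤ k ∧ k < (cols : Int) then (matr.getD i []).getD k.toNat 0 else (matr.getD i []).getD j 0

-- one iteration of Source B's outer loop: process anti-diagonal d from the previous wavefront.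
-- Python's diag[i] (KeyError when absent) is ported as getD _ 0; under Pre_full_time the
-- key is always present (proved by the wavefront invariant below), so this is exact there.
def diagStep (matr : List (List Int)) (r : List Int) (rows cols : Nat)
    (diag : PySem.Dict Nat Int) (d : Nat) : PySem.Dict Nat Int :=
  -- lo = d - cols + 1 if d - cols + 1 > 0 else 0  (Nat form of the same max)
  let lo : Nat := if cols < d + 1 then d + 1 - cols else 0
  let hi : Nat := if d < rows - 1 then d else rows - 1
  (List.range' lo (hi + 1 - lo)).foldl (fun nd (i : Nat) =>
    let j := d - i
    if i = 0 ∧ j = 0 then nd.insert i (costB matr r cols 0 0)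
    else if i = 0 then nd.insert i (diag.getD 0 0 + costB matr r cols 0 j)
    else if j = 0 then nd.insert i (diag.getD (i - 1) 0 + costB matr r cols i 0)
    else nd.insert i (costB matr r cols i j + max (diag.getD (i - 1) 0) (diag.getD i 0)))
    PySem.Dict.empty

def full_time_alt (matr : List (List Int)) (r : List Int) : Int :=
  let rows := matr.length
  let cols := (matr.getD 0 []).length
  let diag := (List.range (rows + cols - 1)).foldl (diagStep matr r rows cols) PySem.Dict.empty
  diag.getD (rows - 1) 0

-- ===== PRECONDITION & SPEC =====
-- Pre_ is exactly the set of inputs on which the Python A returns (no IndexError):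
-- a nonempty matrix whose first row is nonempty, every row at least as long as the first,
-- and r never asks to write a valid column value at a position past the end of some row.
def Pre_full_time (matr : List (List Int)) (r : List Int) : Prop :=
  matr ≠ [] ∧ 1 ≤ (matr.getD 0 []).length ∧
  (∀ row ∈ matr, (matr.getD 0 []).length ≤ row.length) ∧
  (∀ n < r.length, 1 ≤ r.getD n 0 → r.getD n 0 ≤ ((matr.getD 0 []).length : Int) →
    ∀ row ∈ matr, n < row.length)
instance (matr : List (List Int)) (r : List Int) : Decidable (Pre_full_time matr r) := by
  unfold Pre_full_time; infer_instance

def pvWitness_full_time : List (List Int) × List Int := ([[1, 2], [3, 4]], [2, 1])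

def Spec_full_time (matr : List (List Int)) (r : List Int) (out : Int) : Prop :=
  out = full_time_alt matr r
instance (matr : List (List Int)) (r : List Int) (out : Int) :
    Decidable (Spec_full_time matr r out) := by unfold Spec_full_time; infer_instance

-- ===== CLAIM (what is proved, stated in full; the proofs are below) =====
def Claim_equal_full_time : Prop := ∀ (matr : List (List Int)) (r : List Int),
  Dom_full_time matr r → Pre_full_time matr r → Spec_full_time matr r (full_time matr r)

-- ===== LEMMAS AND PROOFS =====

-- the permuted matrix, as a function of indices
def Pf (matr : List (List Int)) (r : List Int) (i j : Nat) : Int :=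
  if j < r.length ∧ 1 ≤ r.getD j 0 ∧ r.getD j 0 ≤ ((matr.getD 0 []).length : Int)
  then (matr.getD i []).getD (r.getD j 0 - 1).toNat 0
  else (matr.getD i []).getD j 0

-- the max-path DP table over a cost function P
def Tf (P : Nat → Nat → Int) : Nat → Nat → Int
  | 0, 0 => P 0 0
  | 0, j + 1 => Tf P 0 j + P 0 (j + 1)
  | i + 1, 0 => Tf P i 0 + P (i + 1) 0
  | i + 1, j + 1 => P (i + 1) (j + 1) + max (Tf P i (j + 1)) (Tf P (i + 1) j)
termination_by i j => i + j

-- shapes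
def sameShape (m matr : List (List Int)) : Prop :=
  m.length = matr.length ∧ ∀ i, (m.getD i []).length = (matr.getD i []).length

lemma range'_one_concat (n : Nat) : List.range' 1 (n + 1) = List.range' 1 n ++ [n + 1] := by
  have h := List.range'_concat (s := 1) (n := n) (step := 1)
  simpa [Nat.add_comm] using h

lemma mem_of_getD (l : List (List Int)) (i : Nat) (h : i < l.length) : l.getD i [] ∈ l := by
  rw [List.getD_eq_getElem?_getD, List.getElem?_eq_getElem h]
  exact List.getElem_mem h

lemma length_pvSet (m : List (List Int)) (a b : Nat) (v : Int) :
    (pvSet m a b v).length = m.length := by simp [pvSet]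

lemma getD_pvSet_row (m : List (List Int)) (a b : Nat) (v : Int) (i : Nat) :
    (pvSet m a b v).getD i [] = if a = i ∧ a < m.length then (m.getD a []).set b v else m.getD i [] := by
  unfold pvSet
  rw [List.getD_eq_getElem?_getD, List.getElem?_set, List.getD_eq_getElem?_getD]
  by_cases hai : a = i
  · subst hai
    by_cases ha : a < m.length
    · simp [ha]
    · simp [ha]
  · simp [hai]

lemma rowLen_pvSet (m : List (List Int)) (a b : Nat) (v : Int) (i : Nat) :
    ((pvSet m a b v).getD i []).length = (m.getD i []).length := by
  rw [getD_pvSet_row]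
  by_cases h : a = i ∧ a < m.length
  · rcases h with ⟨h1, h2⟩; subst h1; simp [h2]
  · simp [h]

lemma pvGet_pvSet_ne (m : List (List Int)) (a b : Nat) (v : Int) (i j : Nat)
    (h : a ≠ i ∨ b ≠ j) : pvGet (pvSet m a b v) i j = pvGet m i j := by
  unfold pvGet
  rw [getD_pvSet_row]
  by_cases hai : a = i ∧ a < m.length
  · rcases hai with ⟨h1, h2⟩
    subst h1
    rcases h with h | h
    · exact absurd rfl h
    · simp [h2, List.getD_eq_getElem?_getD, h]
  · simp [hai]

lemma pvGet_pvSet_self (m : List (List Int)) (a b : Nat) (v : Int)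
    (ha : a < m.length) (hb : b < (m.getD a []).length) :
    pvGet (pvSet m a b v) a b = v := by
  unfold pvGet
  rw [getD_pvSet_row]
  have hg : m.getD a [] = m[a] := by
    rw [List.getD_eq_getElem?_getD, List.getElem?_eq_getElem ha]; rfl
  rw [hg] at hb
  simp [ha, List.getD_eq_getElem?_getD, hb]

lemma sameShape_pvSet (m matr : List (List Int)) (a b : Nat) (v : Int)
    (h : sameShape m matr) : sameShape (pvSet m a b v) matr :=
  ⟨by rw [length_pvSet]; exact h.1, fun i => by rw [rowLen_pvSet]; exact h.2 i⟩

-- generic loop-invariant principles for Python's range(K), range(1, K+1), range(lo, lo+K)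
lemma range_fold_inv {α : Type} (f : α → Nat → α) (P : Nat → α → Prop) (K : Nat) (m : α)
    (h0 : P 0 m) (hs : ∀ k acc, k < K → P k acc → P (k + 1) (f acc k)) :
    P K ((List.range K).foldl f m) := by
  induction K with
  | zero => simpa using h0
  | succ k ih =>
    rw [List.range_succ, List.foldl_append]
    exact hs k _ (Nat.lt_succ_self k)
      (ih (fun k' acc hk' hP => hs k' acc (hk'.trans (Nat.lt_succ_self k)) hP))

lemma range'_fold_inv {α : Type} (f : α → Nat → α) (P : Nat → α → Prop) (K : Nat) (m : α)
    (h0 : P 0 m) (hs : ∀ k acc, k < K → P k acc → P (k + 1) (f acc (k + 1))) :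
    P K ((List.range' 1 K).foldl f m) := by
  induction K with
  | zero => simpa using h0
  | succ k ih =>
    rw [range'_one_concat, List.foldl_append]
    exact hs k _ (Nat.lt_succ_self k)
      (ih (fun k' acc hk' hP => hs k' acc (hk'.trans (Nat.lt_succ_self k)) hP))

lemma range'_fold_inv_from {α : Type} (f : α → Nat → α) (P : Nat → α → Prop) (lo K : Nat)
    (m : α) (h0 : P lo m)
    (hs : ∀ k acc, lo ≤ k → k < lo + K → P k acc → P (k + 1) (f acc k)) :
    P (lo + K) ((List.range' lo K).foldl f m) := by
  induction K with
  | zero => simpa using h0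
  | succ k ih =>
    have hc : List.range' lo (k + 1) = List.range' lo k ++ [lo + k] := by
      simpa using List.range'_concat (s := lo) (n := k) (step := 1)
    rw [hc, List.foldl_append]
    exact hs (lo + k) _ (Nat.le_add_right lo k) (by omega)
      (ih (fun k' acc h1 h2 hP => hs k' acc h1 (by omega) hP))

-- a fold that fires on at most one index
lemma fold_match {α : Type} (c : Int) (L : Nat) (f : α → Nat → α) (m : α) :
    (List.range L).foldl (fun acc (j : Nat) => if c = (j : Int) then f acc j else acc) m
      = if 0 ≤ c ∧ c < (L : Int) then f m c.toNat else m := by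
  induction L with
  | zero =>
    rw [if_neg (by omega)]
    simp
  | succ L ih =>
    rw [List.range_succ, List.foldl_append, ih]
    simp only [List.foldl_cons, List.foldl_nil]
    by_cases h1 : 0 ≤ c ∧ c < (L : Int)
    · rw [if_pos h1, if_neg (by omega), if_pos (by push_cast; omega)]
    · rw [if_neg h1]
      by_cases h2 : c = (L : Int)
      · rw [if_pos h2, if_pos (by omega)]
        congr 1
        omega
      · rw [if_neg h2, if_neg (by push_cast at h1 ⊢; omega)]

lemma fold_match_set (c : Int) (L : Nat) (a b : Nat) (w : Nat → Int) (m : List (List Int)) :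
    (List.range L).foldl (fun acc (j : Nat) => if c = (j : Int) then pvSet acc a b (w j) else acc) m
      = if 0 ≤ c ∧ c < (L : Int) then pvSet m a b (w c.toNat) else m :=
  fold_match c L (fun acc j => pvSet acc a b (w j)) m

lemma ftPermStep_char (matr : List (List Int)) (r : List Int) (n : Nat) (m : List (List Int))
    (hsh : sameShape m matr)
    (hset : 1 ≤ r.getD n 0 → r.getD n 0 ≤ ((matr.getD 0 []).length : Int) →
      ∀ i < matr.length, n < (matr.getD i []).length) :
    sameShape (ftPermStep matr r m n) matr ∧
    ∀ i j : Nat, pvGet (ftPermStep matr r m n) i j =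
      if 1 ≤ r.getD n 0 ∧ r.getD n 0 ≤ ((matr.getD 0 []).length : Int) ∧ j = n ∧ i < matr.length
      then pvGet matr i (r.getD n 0 - 1).toNat
      else pvGet m i j := by
  unfold ftPermStep
  rw [hsh.1]
  have key := range_fold_inv
    (f := fun m i =>
      (List.range (m.getD 0 []).length).foldl (fun m (j : Nat) =>
        if r.getD n 0 - 1 = (j : Int) then pvSet m i n (pvGet matr i j) else m) m)
    (P := fun k acc => sameShape acc matr ∧ ∀ i j : Nat, pvGet acc i j =
      if 1 ≤ r.getD n 0 ∧ r.getD n 0 ≤ ((matr.getD 0 []).length : Int) ∧ j = n ∧ i < k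
      then pvGet matr i (r.getD n 0 - 1).toNat
      else pvGet m i j)
    matr.length m ?_ ?_
  · exact key
  · exact ⟨hsh, fun i j => by rw [if_neg (by omega)]⟩
  · intro k acc hk ih
    beta_reduce
    rw [ih.1.2 0, fold_match_set (r.getD n 0 - 1) (matr.getD 0 []).length k n (pvGet matr k)]
    by_cases hv : 0 ≤ r.getD n 0 - 1 ∧ r.getD n 0 - 1 < ((matr.getD 0 []).length : Int)
    · rw [if_pos hv]
      have h1 : 1 ≤ r.getD n 0 := by omega
      have h2 : r.getD n 0 ≤ ((matr.getD 0 []).length : Int) := by omega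
      refine ⟨sameShape_pvSet _ _ _ _ _ ih.1, fun i j => ?_⟩
      by_cases hij : k = i ∧ n = j
      · rcases hij with ⟨hik, hnj⟩
        subst hik; subst hnj
        rw [pvGet_pvSet_self _ _ _ _ (by rw [ih.1.1]; exact hk)
          (by rw [ih.1.2 k]; exact hset h1 h2 k hk)]
        rw [if_pos ⟨h1, h2, rfl, by omega⟩]
      · rw [pvGet_pvSet_ne _ _ _ _ _ _ (by tauto), ih.2 i j]
        by_cases hj : j = n
        · subst hj
          have hik : ¬ i = k := fun hc => hij ⟨hc.symm, rfl⟩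
          refine if_congr ⟨fun h => ⟨h.1, h.2.1, rfl, by omega⟩,
            fun h => ⟨h.1, h.2.1, rfl, by omega⟩⟩ rfl rfl
        · refine if_congr ⟨fun h => absurd h.2.2.1 hj, fun h => absurd h.2.2.1 hj⟩ rfl rfl
    · rw [if_neg hv]
      refine ⟨ih.1, fun i j => ?_⟩
      rw [ih.2 i j, if_neg (by omega), if_neg (by omega)]

def PfN (matr : List (List Int)) (r : List Int) (N i j : Nat) : Int :=
  if j < N ∧ 1 ≤ r.getD j 0 ∧ r.getD j 0 ≤ ((matr.getD 0 []).length : Int) ∧ i < matr.length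
  then (matr.getD i []).getD (r.getD j 0 - 1).toNat 0
  else pvGet matr i j

lemma ftPerm_char (matr : List (List Int)) (r : List Int) (pre : Pre_full_time matr r) :
    sameShape (ftPerm matr r) matr ∧
    ∀ i j : Nat, i < matr.length →
      pvGet (ftPerm matr r) i j = PfN matr r r.length i j := by
  unfold ftPerm
  have key := range_fold_inv (f := ftPermStep matr r)
    (P := fun N acc => sameShape acc matr ∧ ∀ i j : Nat, pvGet acc i j = PfN matr r N i j)
    r.length matr ?_ ?_
  · exact ⟨key.1, fun i j _ => key.2 i j⟩
  · refine ⟨⟨rfl, fun i => rfl⟩, fun i j => ?_⟩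
    rw [PfN, if_neg (by omega)]
  · intro n acc hn ih
    have hset : 1 ≤ r.getD n 0 → r.getD n 0 ≤ ((matr.getD 0 []).length : Int) →
        ∀ i < matr.length, n < (matr.getD i []).length := by
      intro h1 h2 i hi
      exact pre.2.2.2 n hn h1 h2 _ (mem_of_getD matr i hi)
    have hstep := ftPermStep_char matr r n acc ih.1 hset
    refine ⟨hstep.1, fun i j => ?_⟩
    rw [hstep.2 i j, ih.2 i j]
    by_cases hj : j = n
    · subst hj
      by_cases hv : 1 ≤ r.getD j 0 ∧ r.getD j 0 ≤ ((matr.getD 0 []).length : Int) ∧ i < matr.length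
      · rw [if_pos ⟨hv.1, hv.2.1, rfl, hv.2.2⟩, PfN, if_pos ⟨by omega, hv⟩]
        rfl
      · rw [if_neg (by tauto), PfN, if_neg (by omega), PfN, if_neg (by tauto)]
    · rw [if_neg (by tauto), PfN, PfN]
      refine if_congr ⟨fun h => ⟨by omega, h.2⟩, fun h => ⟨by omega, h.2⟩⟩ rfl rfl

lemma PfN_top (matr : List (List Int)) (r : List Int) (i j : Nat) (hi : i < matr.length) :
    PfN matr r r.length i j = Pf matr r i j := by
  unfold PfN Pf pvGet
  exact if_congr (by tauto) rfl rfl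

lemma Tf_zero_zero (P : Nat → Nat → Int) : Tf P 0 0 = P 0 0 := by simp [Tf]
lemma Tf_zero_succ (P : Nat → Nat → Int) (j : Nat) : Tf P 0 (j + 1) = Tf P 0 j + P 0 (j + 1) := by
  simp [Tf]
lemma Tf_succ_zero (P : Nat → Nat → Int) (i : Nat) : Tf P (i + 1) 0 = Tf P i 0 + P (i + 1) 0 := by
  simp [Tf]
lemma Tf_succ_succ (P : Nat → Nat → Int) (i j : Nat) :
    Tf P (i + 1) (j + 1) = P (i + 1) (j + 1) + max (Tf P i (j + 1)) (Tf P (i + 1) j) := by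
  rw [Tf]

lemma ftRow0_char (matr : List (List Int)) (r : List Int) (pre : Pre_full_time matr r)
    (m : List (List Int)) (hsh : sameShape m matr)
    (hchar : ∀ i j : Nat, i < matr.length → pvGet m i j = Pf matr r i j) :
    sameShape (ftRow0 m) matr ∧
    ∀ i j : Nat, i < matr.length → j < (matr.getD 0 []).length →
      pvGet (ftRow0 m) i j = if i = 0 then Tf (Pf matr r) 0 j else Pf matr r i j := by
  have hrows : 0 < matr.length := List.length_pos_of_ne_nil pre.1
  have hcols : 1 ≤ (matr.getD 0 []).length := pre.2.1
  have hcr : ∀ i < matr.length, (matr.getD 0 []).length ≤ (matr.getD i []).length :=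
    fun i hi => pre.2.2.1 _ (mem_of_getD matr i hi)
  unfold ftRow0
  rw [hsh.2 0]
  have key := range'_fold_inv
    (f := fun m j => pvSet m 0 j (pvGet m 0 j + pvGet m 0 (j - 1)))
    (P := fun K acc => sameShape acc matr ∧ ∀ i j : Nat, i < matr.length →
      j < (matr.getD 0 []).length →
      pvGet acc i j = if i = 0 ∧ j ≤ K then Tf (Pf matr r) 0 j else Pf matr r i j)
    ((matr.getD 0 []).length - 1) m ?_ ?_
  · refine ⟨key.1, fun i j hi hj => ?_⟩
    rw [key.2 i j hi hj]
    exact if_congr ⟨fun h => h.1, fun h => ⟨h, by omega⟩⟩ rfl rfl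
  · refine ⟨hsh, fun i j hi hj => ?_⟩
    rw [hchar i j hi]
    by_cases h : i = 0 ∧ j ≤ 0
    · rw [if_pos h, h.1, Nat.le_zero.mp h.2, Tf_zero_zero]
    · rw [if_neg h]
  · intro k acc hk ih
    beta_reduce
    have hlen0 : 0 < acc.length := by rw [ih.1.1]; exact hrows
    have hrl : k + 1 < (acc.getD 0 []).length := by
      rw [ih.1.2 0]; omega
    have hval : pvGet acc 0 (k + 1) + pvGet acc 0 (k + 1 - 1) = Tf (Pf matr r) 0 (k + 1) := by
      rw [show k + 1 - 1 = k from rfl, ih.2 0 (k + 1) hrows (by omega),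
        ih.2 0 k hrows (by omega), if_neg (by omega), if_pos ⟨rfl, le_refl k⟩,
        Tf_zero_succ, add_comm]
    refine ⟨sameShape_pvSet _ _ _ _ _ ih.1, fun i j hi hj => ?_⟩
    by_cases hij : i = 0 ∧ j = k + 1
    · rw [hij.1, hij.2, pvGet_pvSet_self _ _ _ _ hlen0 hrl, hval,
        if_pos ⟨rfl, le_refl (k + 1)⟩]
    · rw [pvGet_pvSet_ne _ _ _ _ _ _ (by tauto), ih.2 i j hi hj]
      refine if_congr ⟨fun h => ⟨h.1, by omega⟩, fun h => ⟨h.1, ?_⟩⟩ rfl rfl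
      rcases h with ⟨h1, h2⟩
      have : ¬ j = k + 1 := fun hc => hij ⟨h1, hc⟩
      omega

lemma ftCol0_char (matr : List (List Int)) (r : List Int) (pre : Pre_full_time matr r)
    (m : List (List Int)) (hsh : sameShape m matr)
    (hchar : ∀ i j : Nat, i < matr.length → j < (matr.getD 0 []).length →
      pvGet m i j = if i = 0 then Tf (Pf matr r) 0 j else Pf matr r i j) :
    sameShape (ftCol0 m) matr ∧
    ∀ i j : Nat, i < matr.length → j < (matr.getD 0 []).length →
      pvGet (ftCol0 m) i j =
        if i = 0 then Tf (Pf matr r) 0 j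
        else if j = 0 then Tf (Pf matr r) i 0 else Pf matr r i j := by
  have hrows : 0 < matr.length := List.length_pos_of_ne_nil pre.1
  have hcols : 1 ≤ (matr.getD 0 []).length := pre.2.1
  have hcr : ∀ i < matr.length, (matr.getD 0 []).length ≤ (matr.getD i []).length :=
    fun i hi => pre.2.2.1 _ (mem_of_getD matr i hi)
  unfold ftCol0
  rw [hsh.1]
  have key := range'_fold_inv
    (f := fun m j => pvSet m j 0 (pvGet m j 0 + pvGet m (j - 1) 0))
    (P := fun K acc => sameShape acc matr ∧ ∀ i j : Nat, i < matr.length →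
      j < (matr.getD 0 []).length →
      pvGet acc i j =
        if i = 0 then Tf (Pf matr r) 0 j
        else if j = 0 ∧ i ≤ K then Tf (Pf matr r) i 0 else Pf matr r i j)
    (matr.length - 1) m ?_ ?_
  · refine ⟨key.1, fun i j hi hj => ?_⟩
    rw [key.2 i j hi hj]
    by_cases h0 : i = 0
    · rw [if_pos h0, if_pos h0]
    · rw [if_neg h0, if_neg h0]
      exact if_congr ⟨fun h => h.1, fun h => ⟨h, by omega⟩⟩ rfl rfl
  · refine ⟨hsh, fun i j hi hj => ?_⟩
    rw [hchar i j hi hj]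
    by_cases h0 : i = 0
    · rw [if_pos h0, if_pos h0]
    · rw [if_neg h0, if_neg h0, if_neg (by omega)]
  · intro k acc hk ih
    beta_reduce
    have hik : k + 1 < acc.length := by rw [ih.1.1]; omega
    have hrl : 0 < (acc.getD (k + 1) []).length := by
      rw [ih.1.2 (k + 1)]
      have := hcr (k + 1) (by omega)
      omega
    have hval : pvGet acc (k + 1) 0 + pvGet acc (k + 1 - 1) 0 = Tf (Pf matr r) (k + 1) 0 := by
      have hgk : pvGet acc k 0 = Tf (Pf matr r) k 0 := by
        rw [ih.2 k 0 (by omega) (by omega)]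
        by_cases h0 : k = 0
        · rw [if_pos h0, h0]
        · rw [if_neg h0, if_pos ⟨rfl, le_refl k⟩]
      rw [show k + 1 - 1 = k from rfl, ih.2 (k + 1) 0 (by omega) (by omega),
        if_neg (by omega), if_neg (by omega), hgk, Tf_succ_zero, add_comm]
    refine ⟨sameShape_pvSet _ _ _ _ _ ih.1, fun i j hi hj => ?_⟩
    by_cases hij : i = k + 1 ∧ j = 0
    · rw [hij.1, hij.2, pvGet_pvSet_self _ _ _ _ hik hrl, hval, if_neg (by omega),
        if_pos ⟨rfl, by omega⟩]
    · rw [pvGet_pvSet_ne _ _ _ _ _ _ (by tauto), ih.2 i j hi hj]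
      by_cases h0 : i = 0
      · rw [if_pos h0, if_pos h0]
      · rw [if_neg h0, if_neg h0]
        refine if_congr ⟨fun h => ⟨h.1, by omega⟩, fun h => ⟨h.1, ?_⟩⟩ rfl rfl
        rcases h with ⟨h1, h2⟩
        have : ¬ i = k + 1 := fun hc => hij ⟨hc, h1⟩
        omega

lemma ftDPCol_char (matr : List (List Int)) (r : List Int) (pre : Pre_full_time matr r)
    (I : Nat) (hI : 1 ≤ I) (hIc : I < (matr.getD 0 []).length)
    (m : List (List Int)) (hsh : sameShape m matr)
    (hchar : ∀ i j : Nat, i < matr.length → j < (matr.getD 0 []).length →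
      pvGet m i j = if j < I ∨ i = 0 then Tf (Pf matr r) i j else Pf matr r i j) :
    sameShape (ftDPCol m I) matr ∧
    ∀ i j : Nat, i < matr.length → j < (matr.getD 0 []).length →
      pvGet (ftDPCol m I) i j =
        if j < I + 1 ∨ i = 0 then Tf (Pf matr r) i j else Pf matr r i j := by
  have hrows : 0 < matr.length := List.length_pos_of_ne_nil pre.1
  have hcr : ∀ i < matr.length, (matr.getD 0 []).length ≤ (matr.getD i []).length :=
    fun i hi => pre.2.2.1 _ (mem_of_getD matr i hi)
  obtain ⟨I', rfl⟩ : ∃ I', I = I' + 1 := ⟨I - 1, by omega⟩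
  unfold ftDPCol
  rw [hsh.1]
  have key := range'_fold_inv
    (f := fun m j => pvSet m j (I' + 1)
      (pvGet m j (I' + 1) + max (pvGet m (j - 1) (I' + 1)) (pvGet m j (I' + 1 - 1))))
    (P := fun K acc => sameShape acc matr ∧ ∀ i j : Nat, i < matr.length →
      j < (matr.getD 0 []).length →
      pvGet acc i j =
        if j < I' + 1 ∨ i = 0 ∨ (j = I' + 1 ∧ i ≤ K) then Tf (Pf matr r) i j
        else Pf matr r i j)
    (matr.length - 1) m ?_ ?_
  · refine ⟨key.1, fun i j hi hj => ?_⟩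
    rw [key.2 i j hi hj]
    refine if_congr ⟨fun h => ?_, fun h => ?_⟩ rfl rfl <;> omega
  · refine ⟨hsh, fun i j hi hj => ?_⟩
    rw [hchar i j hi hj]
    refine if_congr ⟨fun h => ?_, fun h => ?_⟩ rfl rfl <;> omega
  · intro k acc hk ih
    beta_reduce
    have hik : k + 1 < acc.length := by rw [ih.1.1]; omega
    have hrl : I' + 1 < (acc.getD (k + 1) []).length := by
      rw [ih.1.2 (k + 1)]
      have := hcr (k + 1) (by omega)
      omega
    have hup : pvGet acc k (I' + 1) = Tf (Pf matr r) k (I' + 1) := by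
      rw [ih.2 k (I' + 1) (by omega) hIc, if_pos (by omega)]
    have hval : pvGet acc (k + 1) (I' + 1) +
        max (pvGet acc (k + 1 - 1) (I' + 1)) (pvGet acc (k + 1) (I' + 1 - 1)) =
        Tf (Pf matr r) (k + 1) (I' + 1) := by
      rw [show k + 1 - 1 = k from rfl, show I' + 1 - 1 = I' from rfl,
        ih.2 (k + 1) (I' + 1) (by omega) hIc, if_neg (by omega), hup,
        ih.2 (k + 1) I' (by omega) (by omega), if_pos (by omega), Tf_succ_succ]
    refine ⟨sameShape_pvSet _ _ _ _ _ ih.1, fun i j hi hj => ?_⟩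
    by_cases hij : i = k + 1 ∧ j = I' + 1
    · rw [hij.1, hij.2, pvGet_pvSet_self _ _ _ _ hik hrl, hval, if_pos (by omega)]
    · rw [pvGet_pvSet_ne _ _ _ _ _ _ (by tauto), ih.2 i j hi hj]
      refine if_congr ⟨fun h => ?_, fun h => ?_⟩ rfl rfl
      · omega
      · rcases h with h | h | ⟨h1, h2⟩
        · omega
        · omega
        · have : ¬ i = k + 1 := fun hc => hij ⟨hc, h1⟩
          omega

lemma ftDP_char (matr : List (List Int)) (r : List Int) (pre : Pre_full_time matr r)
    (m : List (List Int)) (hsh : sameShape m matr)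
    (hchar : ∀ i j : Nat, i < matr.length → j < (matr.getD 0 []).length →
      pvGet m i j =
        if i = 0 then Tf (Pf matr r) 0 j
        else if j = 0 then Tf (Pf matr r) i 0 else Pf matr r i j) :
    sameShape (ftDP m) matr ∧
    ∀ i j : Nat, i < matr.length → j < (matr.getD 0 []).length →
      pvGet (ftDP m) i j = Tf (Pf matr r) i j := by
  unfold ftDP
  rw [hsh.2 0]
  have key := range'_fold_inv (f := ftDPCol)
    (P := fun K acc => sameShape acc matr ∧ ∀ i j : Nat, i < matr.length →
      j < (matr.getD 0 []).length →
      pvGet acc i j = if j < K + 1 ∨ i = 0 then Tf (Pf matr r) i j else Pf matr r i j)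
    ((matr.getD 0 []).length - 1) m ?_ ?_
  · refine ⟨key.1, fun i j hi hj => ?_⟩
    rw [key.2 i j hi hj, if_pos (by omega)]
  · refine ⟨hsh, fun i j hi hj => ?_⟩
    rw [hchar i j hi hj]
    by_cases h0 : i = 0
    · rw [if_pos h0, if_pos (by omega), h0]
    · rw [if_neg h0]
      by_cases hj0 : j = 0
      · rw [if_pos hj0, if_pos (by omega), hj0]
      · rw [if_neg hj0, if_neg (by omega)]
  · intro k acc hk ih
    have hstep := ftDPCol_char matr r pre (k + 1) (by omega) (by omega) acc ih.1
      (fun i j hi hj => by rw [ih.2 i j hi hj])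
    refine ⟨hstep.1, fun i j hi hj => ?_⟩
    rw [hstep.2 i j hi hj]

lemma A_total (matr : List (List Int)) (r : List Int) (pre : Pre_full_time matr r) :
    full_time matr r = Tf (Pf matr r) (matr.length - 1) ((matr.getD 0 []).length - 1) := by
  have hrows : 0 < matr.length := List.length_pos_of_ne_nil pre.1
  have hcols : 1 ≤ (matr.getD 0 []).length := pre.2.1
  have h1 := ftPerm_char matr r pre
  have h2 := ftRow0_char matr r pre _ h1.1
    (fun i j hi => by rw [h1.2 i j hi, PfN_top matr r i j hi])
  have h3 := ftCol0_char matr r pre _ h2.1 h2.2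
  have h4 := ftDP_char matr r pre _ h3.1 h3.2
  unfold full_time
  simp only []
  rw [h4.1.1, (h4.1.2 0)]
  exact h4.2 _ _ (by omega) (by omega)

-- B side: the wavefront invariant

lemma costB_Pf (matr : List (List Int)) (r : List Int) (i j : Nat) :
    costB matr r (matr.getD 0 []).length i j = Pf matr r i j := by
  unfold costB Pf
  dsimp only
  by_cases h1 : j < r.length
  · rw [if_pos h1]
    by_cases h2 : 1 ≤ r.getD j 0 ∧ r.getD j 0 ≤ ((matr.getD 0 []).length : Int)
    · rw [if_pos ⟨by omega, by omega⟩, if_pos ⟨h1, h2.1, h2.2⟩]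
    · rw [if_neg (by omega), if_neg (by tauto)]
  · rw [if_neg h1, if_neg (by omega), if_neg (by tauto)]

-- after processing anti-diagonal d, the wavefront holds T i (d - i) at every cell of diagonal d
lemma diagStep_char (matr : List (List Int)) (r : List Int) (d : Nat)
    (hR : 0 < matr.length) (hC : 1 ≤ (matr.getD 0 []).length)
    (diag : PySem.Dict Nat Int)
    (hprev : ∀ i j : Nat, i + j + 1 = d → i < matr.length → j < (matr.getD 0 []).length →
      diag.getD i 0 = Tf (Pf matr r) i j) :
    ∀ i j : Nat, i + j = d → i < matr.length → j < (matr.getD 0 []).length →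
      (diagStep matr r matr.length (matr.getD 0 []).length diag d).getD i 0
        = Tf (Pf matr r) i j := by
  set R := matr.length with hRdef
  set C := (matr.getD 0 []).length with hCdef
  unfold diagStep
  dsimp only
  set lo : Nat := if C < d + 1 then d + 1 - C else 0 with hlo
  set hi : Nat := if d < R - 1 then d else R - 1 with hhi
  have hloC : d + 1 - C ≤ lo ∧ lo ≤ d + 1 - C + 0 ∧ (lo = 0 ∨ lo = d + 1 - C) := by
    rw [hlo]; split_ifs <;> omega
  have key := range'_fold_inv_from
    (f := fun nd (i : Nat) =>
      let j := d - i
      if i = 0 ∧ j = 0 then nd.insert i (costB matr r C 0 0)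
      else if i = 0 then nd.insert i (diag.getD 0 0 + costB matr r C 0 j)
      else if j = 0 then nd.insert i (diag.getD (i - 1) 0 + costB matr r C i 0)
      else nd.insert i (costB matr r C i j + max (diag.getD (i - 1) 0) (diag.getD i 0)))
    (P := fun k nd => ∀ i j : Nat, i + j = d → lo ≤ i → i < k →
      nd.getD i 0 = Tf (Pf matr r) i j)
    lo (hi + 1 - lo) PySem.Dict.empty ?_ ?_
  · intro i j hij hiR hjC
    have hilo : lo ≤ i := by rw [hlo]; split_ifs <;> omega
    have hihi : i < lo + (hi + 1 - lo) := by rw [hhi] at *; split_ifs at * <;> omega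
    exact key i j hij hilo hihi
  · intro i j _ _ h
    omega
  · intro k nd hk1 hk2 ih i j hij hilo hik
    have hjk : ∀ (v : Int), (nd.insert k v).getD i 0 = if i = k then v else nd.getD i 0 :=
      fun v => by rw [PySem.Dict.getD_insert]
    have hklo : d - k + k = d := by
      rw [hhi] at hk2; split_ifs at hk2 <;> omega
    by_cases hikk : i = k
    · subst hikk
      have hjd : j = d - i := by omega
      subst hjd
      dsimp only
      have hkR : i < R := by rw [hhi] at hk2; split_ifs at hk2 <;> omega
      have hjC : d - i < C := by
        rcases hloC.2.2 with h0 | h0 <;> rw [h0] at hilo <;> omega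
      by_cases hi0 : i = 0
      · subst hi0
        by_cases hj0 : d - 0 = 0
        · rw [if_pos ⟨rfl, hj0⟩, hjk, if_pos rfl, hj0, Tf_zero_zero, hCdef, costB_Pf]
        · rw [if_neg (by tauto), if_pos rfl, hjk _, if_pos rfl]
          obtain ⟨j', hj'⟩ : ∃ j', d - 0 = j' + 1 := ⟨d - 0 - 1, by omega⟩
          rw [hj', Tf_zero_succ,
            hprev 0 j' (by omega) hkR (by omega), hCdef, costB_Pf]
      · by_cases hj0 : d - i = 0
        · rw [if_neg (by tauto), if_neg hi0, if_pos hj0, hjk _, if_pos rfl]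
          obtain ⟨i', hi'⟩ : ∃ i', i = i' + 1 := ⟨i - 1, by omega⟩
          rw [hj0, hi', Tf_succ_zero, show i' + 1 - 1 = i' from rfl,
            hprev i' 0 (by omega) (by omega) (by omega), hCdef, costB_Pf, add_comm]
        · rw [if_neg (by tauto), if_neg hi0, if_neg hj0, hjk _, if_pos rfl]
          obtain ⟨i', hi'⟩ : ∃ i', i = i' + 1 := ⟨i - 1, by omega⟩
          obtain ⟨j', hj'⟩ : ∃ j', d - i = j' + 1 := ⟨d - i - 1, by omega⟩
          rw [hj', hi', Tf_succ_succ, show i' + 1 - 1 = i' from rfl,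
            hprev i' (j' + 1) (by omega) (by omega) (by omega),
            hprev (i' + 1) j' (by omega) (by omega) (by omega), hCdef, costB_Pf]
    · dsimp only
      have hind := ih i j hij hilo (by omega)
      split_ifs <;> rw [hjk _, if_neg hikk] <;> exact hind

lemma B_total (matr : List (List Int)) (r : List Int) (pre : Pre_full_time matr r) :
    full_time_alt matr r = Tf (Pf matr r) (matr.length - 1) ((matr.getD 0 []).length - 1) := by
  have hR : 0 < matr.length := List.length_pos_of_ne_nil pre.1
  have hC : 1 ≤ (matr.getD 0 []).length := pre.2.1
  unfold full_time_alt
  dsimp only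
  have key := range_fold_inv (f := diagStep matr r matr.length (matr.getD 0 []).length)
    (P := fun d diag => ∀ i j : Nat, i + j + 1 = d → i < matr.length →
      j < (matr.getD 0 []).length → diag.getD i 0 = Tf (Pf matr r) i j)
    (matr.length + (matr.getD 0 []).length - 1) PySem.Dict.empty
    (by intro i j h _ _; omega)
    (fun d diag hd ih i j h hiR hjC => diagStep_char matr r d hR hC diag ih i j (by omega) hiR hjC)
  exact key (matr.length - 1) ((matr.getD 0 []).length - 1) (by omega) (by omega) (by omega)

-- ===== VERDICT (by name: the statement is the Claim_ definition above) =====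
theorem full_time_spec : Claim_equal_full_time := by
  intro matr r _ pre
  unfold Spec_full_time
  rw [A_total matr r pre, B_total matr r pre]
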